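-- pv_equiv track=rewrite | github.com/a-brandon/practice | edabit/switching_between_pencils.py | color_pattern_times
-- ===== SOURCE A (Python) =====
-- from collections import Counter
--
-- def color_pattern_times(cols):
--     if len(cols) == 1:
--         return 2
--     freq = sum(Counter(cols).values()) * 2
--     seconds = 0
--     for i, _ in enumerate(cols[:-1]):
--         if cols[i + 1] != cols[i]:
--             seconds += 1
--     return seconds + freq
-- ===== SOURCE B (Python) =====
-- def color_pattern_times(cols):
--     # Divide and conquer: changes(lo, hi) counts indices i with lo < i < hi
--     # and cols[i] != cols[i-1] by splitting the range at mid.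
--     def changes(lo, hi):
--         if hi - lo < 2:
--             return 0
--         mid = (lo + hi) // 2
--         return changes(lo, mid) + changes(mid, hi) + (cols[mid] != cols[mid - 1])
--     return changes(0, len(cols)) + 2 * len(cols)
-- ===== Notes on version B (the rewrite author's own statement) =====
-- stated objective: alternative
-- what changed: Replaces the Counter build, the len==1 special case and the linear indexed scan over adjacent pairs by a divide-and-conquer recursion on index ranges: changes(lo,hi) splits at mid and adds the one boundary comparison cols[mid]!=cols[mid-1], then adds 2*len(cols).
import Mathlib
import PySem

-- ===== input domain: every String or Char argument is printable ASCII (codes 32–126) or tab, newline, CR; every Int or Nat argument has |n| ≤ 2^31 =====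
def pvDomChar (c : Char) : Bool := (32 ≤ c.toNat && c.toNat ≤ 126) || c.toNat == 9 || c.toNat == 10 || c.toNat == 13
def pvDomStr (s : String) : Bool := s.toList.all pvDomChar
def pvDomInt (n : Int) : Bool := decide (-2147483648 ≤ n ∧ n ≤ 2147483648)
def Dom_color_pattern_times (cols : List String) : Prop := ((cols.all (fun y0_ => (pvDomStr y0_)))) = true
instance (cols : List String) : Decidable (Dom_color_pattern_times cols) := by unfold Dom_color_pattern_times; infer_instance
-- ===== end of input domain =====

-- B replaces A's Counter + len==1 special case + linear adjacent-pair scan by a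
-- divide-and-conquer recursion on index ranges (alternative decomposition, same O(n)).

-- ===== PORT A =====
def color_pattern_times (cols : List String) : Int :=
  if cols.length == 1 then 2
  else
    -- freq = sum(Counter(cols).values()) * 2
    let freq : Int := ((PySem.Dict.counter cols).values.foldl (· + ·) 0) * 2
    -- for i, _ in enumerate(cols[:-1]): index sequence 0 .. len(cols)-2 (cols[i] / cols[i+1] are
    -- always in range there, so pyGetD is exact)
    let seconds : Int :=
      (PySem.List.pyRange 0 ((cols.length : Int) - 1) 1).foldl
        (fun s i =>
          if PySem.List.pyGetD cols (i + 1) "" ≠ PySem.List.pyGetD cols i "" then s + 1 else s) 0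
    seconds + freq

-- ===== PORT B =====
-- changes(lo, hi): number of i with lo < i < hi and cols[i] != cols[i-1], by splitting at mid.
-- lo, hi are always nonnegative Python ints here (0 ≤ lo ≤ hi ≤ len), so Nat indices and Nat
-- division render Python's `(lo+hi)//2` and in-range `cols[mid]` / `cols[mid-1]` exactly.
def pvChg (cols : List String) (lo hi : Nat) : Int :=
  if hi - lo < 2 then 0
  else
    let mid := (lo + hi) / 2
    pvChg cols lo mid + pvChg cols mid hi +
      (if cols.getD mid "" ≠ cols.getD (mid - 1) "" then 1 else 0)
termination_by hi - lo
decreasing_by all_goals omega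

def color_pattern_times_alt (cols : List String) : Int :=
  pvChg cols 0 cols.length + 2 * (cols.length : Int)

-- ===== PRECONDITION & SPEC =====
def Spec_color_pattern_times (cols : List String) (out : Int) : Prop := out = color_pattern_times_alt cols
instance (cols : List String) (out : Int) : Decidable (Spec_color_pattern_times cols out) := by unfold Spec_color_pattern_times; infer_instance

-- ===== CLAIM (what is proved, stated in full; the proofs are below) =====
def Claim_equal_color_pattern_times : Prop := ∀ (cols : List String), Dom_color_pattern_times cols → Spec_color_pattern_times cols (color_pattern_times cols)

-- ===== LEMMAS AND PROOFS =====

-- the Counter values sum is just the length of the list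
lemma pv_counter_values_sum (l : List String) :
    ((PySem.Dict.counter l).values.foldl (· + ·) 0) = (l.length : Int) := by
  have hv : (PySem.Dict.counter l).values
      = (PySem.Set.ofList l).map (fun k => (l.count k : Int)) := by
    have := PySem.Dict.items_counter (xs := l)
    simp only [PySem.Dict.values, this, List.map_map]
    rfl
  rw [hv]
  have := PySem.List.foldl_add (l := (PySem.Set.ofList l).map (fun k => (l.count k : Int)))
    (g := fun x => x) (a := 0)
  simp only [List.map_id'] at this
  rw [show (fun (x1 x2 : Int) => x1 + x2) = (fun acc x => acc + (fun y => y) x) from rfl, this]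
  have hperm : (PySem.Set.ofList l : List String).Perm l.dedup := by
    rw [List.perm_ext_iff_of_nodup (PySem.Set.nodup_ofList l) l.nodup_dedup]
    intro x; rw [PySem.Set.mem_ofList, List.mem_dedup]
  have hsum : ((PySem.Set.ofList l).map (fun k => (l.count k : Int))).sum
      = (l.dedup.map (fun k => (l.count k : Int))).sum :=
    (hperm.map _).sum_eq
  rw [hsum]
  have := List.sum_map_count_dedup_eq_length l
  have : (l.dedup.map (fun k => (l.count k : Int))).sum = ((l.dedup.map fun x => l.count x).sum : Int) := by
    push_cast
    simp [List.map_map, Function.comp_def]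
  omega

-- linear count of adjacent unequal pairs (proof-side characterisation of both ports)
def pvChanges : List String → Int
  | a :: b :: t => (if a = b then 0 else 1) + pvChanges (b :: t)
  | _ => 0

lemma pv_zip_foldl (l : List String) (acc : Int) :
    (l.zip l.tail).foldl (fun s p => if p.2 ≠ p.1 then s + 1 else s) acc
      = acc + pvChanges l := by
  induction l generalizing acc with
  | nil => simp [pvChanges]
  | cons a t ih =>
    cases t with
    | nil => simp [pvChanges]
    | cons b t =>
      simp only [List.tail_cons, List.zip_cons_cons, List.foldl_cons]
      rw [show ((b :: t).zip t) = ((b :: t).zip (b :: t).tail) from rfl, ih]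
      by_cases h : a = b
      · simp [pvChanges, h]
      · rw [if_pos (by simpa [ne_comm] using h)]
        simp only [pvChanges, if_neg h]
        ring

lemma pv_seconds_eq (l : List String) :
    (PySem.List.pyRange 0 ((l.length : Int) - 1) 1).foldl
        (fun s i =>
          if PySem.List.pyGetD l (i + 1) "" ≠ PySem.List.pyGetD l i "" then s + 1 else s) 0
      = pvChanges l := by
  cases l with
  | nil =>
    rw [PySem.List.pyRange_one_eq_nil (by simp)]
    simp [pvChanges]
  | cons a t =>
    have hlen : (((a :: t).zip (a :: t).tail).length : Int) = (((a :: t).length : Int) - 1) := by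
      simp [List.length_zip]
    rw [← hlen]
    rw [PySem.List.foldl_congr_mem _ _ (fun (s i : Int) =>
        (fun (s : Int) (p : String × String) => if p.2 ≠ p.1 then s + 1 else s) s
          (PySem.List.pyGetD ((a :: t).zip (a :: t).tail) i ("", ""))) _
      (by
        intro s i hi
        rw [PySem.List.mem_pyRange_one] at hi
        obtain ⟨h0, h1⟩ := hi
        obtain ⟨k, rfl⟩ := Int.eq_ofNat_of_zero_le h0
        have hk : k < ((a :: t).zip (a :: t).tail).length := by exact_mod_cast h1
        have hk1 : k + 1 < (a :: t).length := by
          simp only [List.length_zip, List.length_tail] at hk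
          omega
        have hk0 : k < (a :: t).length := by omega
        have hkt : k < (a :: t).tail.length := by
          simp only [List.length_tail]
          omega
        rw [show ((k : Int) + 1) = (((k + 1 : Nat)) : Int) by push_cast; ring]
        simp only [PySem.List.pyGetD_natCast]
        simp only [List.getD_eq_getElem?_getD, List.tail_cons]
        have hkt' : k < t.length := by simpa using hkt
        have hz : k < ((a :: t).zip t).length := by simpa using hk
        rw [List.getElem?_eq_getElem hz, List.getElem?_eq_getElem hk1,
            List.getElem?_eq_getElem hk0]
        simp [List.getElem_zip])]
    rw [PySem.List.foldl_pyRange_pyGetD' ((a :: t).zip (a :: t).tail) ("", "")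
        (fun (s : Int) (p : String × String) => if p.2 ≠ p.1 then s + 1 else s) 0 (by omega)]
    simpa using pv_zip_foldl (a :: t) 0

-- index-based characterisation: contribution of index i
def pvDiffAt (cols : List String) (i : Nat) : Int :=
  if cols.getD i "" ≠ cols.getD (i - 1) "" then 1 else 0

lemma pv_chg_eq_sum (cols : List String) (lo hi : Nat) :
    pvChg cols lo hi = ((List.range' (lo + 1) (hi - lo - 1)).map (pvDiffAt cols)).sum := by
  induction lo, hi using pvChg.induct with
  | case1 lo hi h =>
    rw [pvChg, if_pos h]
    have : hi - lo - 1 = 0 := by omega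
    simp [this]
  | case2 lo hi h mid ih1 ih2 =>
    rw [pvChg, if_neg h]
    simp only []
    rw [ih1, ih2]
    have hsplit : hi - lo - 1 = (mid - lo - 1) + (1 + (hi - mid - 1)) := by omega
    rw [hsplit, ← List.range'_append]
    have e1 : lo + 1 + 1 * (mid - lo - 1) = mid := by omega
    rw [e1, Nat.add_comm 1 (hi - mid - 1), List.range'_succ]
    simp only [List.map_append, List.map_cons, List.sum_append, List.sum_cons]
    rw [show (if cols.getD ((lo + hi) / 2) "" ≠ cols.getD ((lo + hi) / 2 - 1) "" then (1 : Int) else 0)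
        = pvDiffAt cols ((lo + hi) / 2) from rfl]
    ring

-- shift lemma for the index sum
lemma pv_sum_shift (a : String) (l : List String) (s n : Nat) (hs : 1 ≤ s) :
    ((List.range' (s + 1) n).map (pvDiffAt (a :: l))).sum
      = ((List.range' s n).map (pvDiffAt l)).sum := by
  induction n generalizing s with
  | zero => simp
  | succ n ih =>
    rw [List.range'_succ, List.range'_succ]
    simp only [List.map_cons, List.sum_cons]
    rw [ih (s + 1) (by omega)]
    congr 1
    unfold pvDiffAt
    have h1 : (a :: l).getD (s + 1) "" = l.getD s "" := by
      simp
    have h2 : (a :: l).getD (s + 1 - 1) "" = l.getD (s - 1) "" := by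
      obtain ⟨k, rfl⟩ := Nat.exists_eq_add_of_le hs
      simp [Nat.add_comm 1 k]
    rw [h1, h2]

lemma pv_changes_eq_sum (l : List String) :
    pvChanges l = ((List.range' 1 (l.length - 1)).map (pvDiffAt l)).sum := by
  induction l with
  | nil => simp [pvChanges]
  | cons a t ih =>
    cases t with
    | nil => simp [pvChanges]
    | cons b t =>
      simp only [pvChanges]
      rw [ih]
      have hlen : (a :: b :: t).length - 1 = (t.length + 1) := by simp
      rw [hlen, List.range'_succ]
      simp only [List.map_cons, List.sum_cons]
      rw [pv_sum_shift a (b :: t) 1 t.length (by omega)]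
      have hl2 : (b :: t).length - 1 = t.length := by simp
      rw [hl2]
      have : pvDiffAt (a :: b :: t) 1 = if a = b then 0 else 1 := by
        unfold pvDiffAt
        by_cases h : a = b <;> simp [h, Ne, eq_comm]
      rw [this]

-- ===== VERDICT (by name: the statement is the Claim_ definition above) =====
theorem color_pattern_times_spec : Claim_equal_color_pattern_times := by
  intro cols _
  unfold Spec_color_pattern_times
  simp only [color_pattern_times, color_pattern_times_alt]
  have hb : pvChg cols 0 cols.length
      = ((List.range' 1 (cols.length - 1)).map (pvDiffAt cols)).sum := by
    simpa using pv_chg_eq_sum cols 0 cols.length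
  rw [hb, ← pv_changes_eq_sum]
  cases cols with
  | nil => decide
  | cons a t =>
    cases t with
    | nil => norm_num [pvChanges]
    | cons b t =>
      rw [if_neg (by simp)]
      rw [pv_counter_values_sum, pv_seconds_eq]
      ring
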